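-- pv_equiv track=rewrite | github.com/reedwi/edabit-challenges | app.py | abcmath
-- ===== SOURCE A (Python) =====
-- def abcmath(a, b, c):
--     i = 0
--     while i <= range(b)[-1]:
--         a += a
--         i += 1
--     else:
--         return a % c == 0
--
--     return a*(2**b) % c == 0
-- ===== SOURCE B (Python) =====
-- def abcmath(a, b, c):
--     return (a % c) * pow(2, b, c) % c == 0
-- ===== Notes on version B (the rewrite author's own statement) =====
-- stated objective: faster
-- what changed: Replaces the O(b) doubling loop on ever-growing bigints by modular exponentiation ((a%c)*pow(2,b,c))%c==0, O(log b) multiplications on numbers bounded by c.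
import Mathlib
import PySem

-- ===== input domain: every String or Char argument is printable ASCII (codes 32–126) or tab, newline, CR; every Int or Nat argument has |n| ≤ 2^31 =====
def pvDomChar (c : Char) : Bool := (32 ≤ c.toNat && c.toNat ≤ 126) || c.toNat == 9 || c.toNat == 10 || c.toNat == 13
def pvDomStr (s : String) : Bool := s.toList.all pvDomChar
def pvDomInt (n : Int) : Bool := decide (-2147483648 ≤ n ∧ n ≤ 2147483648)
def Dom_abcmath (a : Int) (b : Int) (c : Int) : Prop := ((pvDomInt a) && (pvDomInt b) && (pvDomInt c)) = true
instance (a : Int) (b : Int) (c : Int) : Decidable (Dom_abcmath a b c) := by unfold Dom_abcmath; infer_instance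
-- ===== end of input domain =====

-- B replaces A's O(b) doubling loop by modular exponentiation mod c: ((a%c)*pow(2,b,c))%c == 0.

-- ===== PORT A =====
-- the while loop: 'while i <= last: a += a; i += 1', fuel-bounded structural recursion
def abcmathLoopA : Int → Int → Int → Nat → Int
  | a, _, _, 0 => a
  | a, i, last, f + 1 => if i ≤ last then abcmathLoopA (a + a) (i + 1) last f else a

def abcmath (a : Int) (b : Int) (c : Int) : Bool :=
  match PySem.List.pyGet? (PySem.List.pyRange 0 b 1) (-1) with
  | none => false          -- range(b)[-1] raises IndexError (b ≤ 0); excluded by Pre_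
  | some last =>
    let a' := abcmathLoopA a 0 last (b.toNat + 1)
    match PySem.Int.mod? a' c with
    | none => false        -- a % c raises ZeroDivisionError (c = 0); excluded by Pre_
    | some r => r == 0

-- ===== PORT B =====
-- pow(2, b, c): binary modular exponentiation, Python '%' semantics (PySem.Int.mod)
def powModB (base : Int) (e : Nat) (m : Int) : Int :=
  if e = 0 then PySem.Int.mod 1 m
  else
    let h := powModB base (e / 2) m
    let h2 := PySem.Int.mod (h * h) m
    if e % 2 = 1 then PySem.Int.mod (h2 * base) m else h2

def abcmath_alt (a : Int) (b : Int) (c : Int) : Bool :=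
  PySem.Int.mod (PySem.Int.mod a c * powModB 2 b.toNat c) c == 0

-- ===== PRECONDITION & SPEC =====
-- Pre_ excludes b ≤ 0 (A's range(b)[-1] raises IndexError) and c = 0 (A raises ZeroDivisionError)
def Pre_abcmath (a : Int) (b : Int) (c : Int) : Prop := 1 ≤ b ∧ c ≠ 0
instance (a : Int) (b : Int) (c : Int) : Decidable (Pre_abcmath a b c) := by unfold Pre_abcmath; infer_instance
def pvWitness_abcmath : Int × Int × Int := (3, 4, 6)

def Spec_abcmath (a : Int) (b : Int) (c : Int) (out : Bool) : Prop := out = abcmath_alt a b c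
instance (a : Int) (b : Int) (c : Int) (out : Bool) : Decidable (Spec_abcmath a b c out) := by unfold Spec_abcmath; infer_instance

-- ===== CLAIM =====
def Claim_equal_abcmath : Prop := ∀ (a : Int) (b : Int) (c : Int), Dom_abcmath a b c → Pre_abcmath a b c → Spec_abcmath a b c (abcmath a b c)

-- ===== LEMMAS AND PROOFS =====

-- range(b)[-1] = b-1 for 1 ≤ b
lemma pyRange_getLast (b : Int) (hb : 1 ≤ b) :
    PySem.List.pyGet? (PySem.List.pyRange 0 b 1) (-1) = some (b - 1) := by
  rw [PySem.List.pyGet?_neg_one]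
  have hb' : b = (b - 1) + 1 := by ring
  rw [hb', PySem.List.pyRange_one_succ_right (by omega)]
  simp

-- loop value: starting at i with i ≤ last, a is doubled (last+1-i) times
lemma abcmathLoopA_eq (f : Nat) : ∀ (a i last : Int), (last + 1 - i).toNat ≤ f →
    abcmathLoopA a i last f = a * 2 ^ (last + 1 - i).toNat := by
  induction f with
  | zero =>
    intro a i last h
    have : (last + 1 - i).toNat = 0 := by omega
    simp [abcmathLoopA, this]
  | succ f ih =>
    intro a i last h
    by_cases hi : i ≤ last
    · have hk : (last + 1 - i).toNat = (last + 1 - (i + 1)).toNat + 1 := by omega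
      simp only [abcmathLoopA, if_pos hi]
      rw [ih (a + a) (i + 1) last (by omega), hk, pow_succ]
      ring
    · have : (last + 1 - i).toNat = 0 := by omega
      simp [abcmathLoopA, if_neg hi, this]

-- PySem.Int.mod x m ≡ x  [ZMOD m]
lemma mod_modEq (x m : Int) : PySem.Int.mod x m ≡ x [ZMOD m] := by
  have h := PySem.Int.floordiv_mul_add_mod x m
  exact Int.modEq_iff_dvd.mpr ⟨PySem.Int.floordiv x m, by linear_combination -h⟩

lemma powModB_modEq (e : Nat) (m : Int) : powModB 2 e m ≡ 2 ^ e [ZMOD m] := by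
  induction e using Nat.strong_induction_on with
  | _ e ih =>
    by_cases he : e = 0
    · subst he
      simpa [powModB] using mod_modEq 1 m
    · have hh : powModB 2 (e / 2) m ≡ 2 ^ (e / 2) [ZMOD m] := ih (e / 2) (by omega)
      have hsq : PySem.Int.mod (powModB 2 (e / 2) m * powModB 2 (e / 2) m) m
          ≡ 2 ^ (e / 2) * 2 ^ (e / 2) [ZMOD m] :=
        (mod_modEq _ m).trans (hh.mul hh)
      rw [powModB, if_neg he]
      by_cases ho : e % 2 = 1
      · have he2 : e = e / 2 + e / 2 + 1 := by omega
        simp only [if_pos ho]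
        refine ((mod_modEq _ m).trans (hsq.mul_right 2)).trans ?_
        have hp : (2:Int) ^ (e / 2) * 2 ^ (e / 2) * 2 = 2 ^ e := by
          rw [← pow_add, ← pow_succ]; congr 1; omega
        rw [hp]
      · have he2 : e = e / 2 + e / 2 := by omega
        simp only [if_neg ho]
        refine hsq.trans ?_
        have hp : (2:Int) ^ (e / 2) * 2 ^ (e / 2) = 2 ^ e := by
          rw [← pow_add]; congr 1; omega
        rw [hp]

theorem abcmath_spec : Claim_equal_abcmath := by
  intro a b c _ hpre
  obtain ⟨hb, hc⟩ := hpre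
  unfold Spec_abcmath abcmath abcmath_alt
  rw [pyRange_getLast b hb]
  have hloop : abcmathLoopA a 0 (b - 1) (b.toNat + 1) = a * 2 ^ b.toNat := by
    rw [abcmathLoopA_eq (b.toNat + 1) a 0 (b - 1) (by omega)]
    congr 2
    omega
  have hm? : ∀ x : Int, PySem.Int.mod? x c = some (PySem.Int.mod x c) := by
    intro x; simp [PySem.Int.mod?, PySem.Int.mod, hc]
  dsimp only
  rw [hloop, hm?]
  have hcong : PySem.Int.mod a c * powModB 2 b.toNat c ≡ a * 2 ^ b.toNat [ZMOD c] :=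
    (mod_modEq a c).mul (powModB_modEq b.toNat c)
  rw [Bool.eq_iff_iff]
  simp only [beq_iff_eq, PySem.Int.mod_eq_zero_iff_dvd]
  exact ⟨fun h => (Int.modEq_zero_iff_dvd.mp (hcong.trans (Int.modEq_zero_iff_dvd.mpr h))),
         fun h => Int.modEq_zero_iff_dvd.mp (hcong.symm.trans (Int.modEq_zero_iff_dvd.mpr h))⟩
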